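-- pv_equiv track=rewrite | github.com/LMMilliken/doctest | inspect_results.py | group_by_tags
-- ===== SOURCE A (Python) =====
-- from typing import Any, Dict, List, Optional, Union
--
-- def group_by_tags(data: List[Any], tags: List[str], repos: Dict[str, Any]):
--     ret = []
--     for tag in tags:
--         ret.append(
--             list(filter(lambda x: x[0] in repos and tag in repos[x[0]]["tags"], data))
--         )
--     ret.append(
--         list(
--             filter(
--                 lambda x: x[0] in repos
--                 and not any(tag in repos[x[0]]["tags"] for tag in tags),
--                 data,
--             )
--         )
--     )
--     return ret
-- ===== SOURCE B (Python) =====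
-- def group_by_tags(data, tags, repos):
--     # One pass over data: index the distinct tags once, bucket each item by
--     # the (deduplicated) tags of its repo instead of re-scanning data per tag.
--     buckets = {}
--     for t in tags:
--         buckets.setdefault(t, [])
--     untagged = []
--     for x in data:
--         key = x[0]
--         if key not in repos:
--             continue
--         rtags = repos[key]["tags"]
--         hit = False
--         for t in dict.fromkeys(rtags):
--             b = buckets.get(t)
--             if b is not None:
--                 b.append(x)
--                 hit = True
--         if not hit:
--             untagged.append(x)
--     return [list(buckets[t]) for t in tags] + [untagged]
-- ===== Notes on version B (the rewrite author's own statement) =====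
-- stated objective: faster
-- what changed: A filters the whole data list once per tag (plus once more for the untagged bucket); B makes a single pass over data, bucketing each item via a dict of per-tag buckets built once from tags and the deduplicated tag list of the item's repo.
import Mathlib
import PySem

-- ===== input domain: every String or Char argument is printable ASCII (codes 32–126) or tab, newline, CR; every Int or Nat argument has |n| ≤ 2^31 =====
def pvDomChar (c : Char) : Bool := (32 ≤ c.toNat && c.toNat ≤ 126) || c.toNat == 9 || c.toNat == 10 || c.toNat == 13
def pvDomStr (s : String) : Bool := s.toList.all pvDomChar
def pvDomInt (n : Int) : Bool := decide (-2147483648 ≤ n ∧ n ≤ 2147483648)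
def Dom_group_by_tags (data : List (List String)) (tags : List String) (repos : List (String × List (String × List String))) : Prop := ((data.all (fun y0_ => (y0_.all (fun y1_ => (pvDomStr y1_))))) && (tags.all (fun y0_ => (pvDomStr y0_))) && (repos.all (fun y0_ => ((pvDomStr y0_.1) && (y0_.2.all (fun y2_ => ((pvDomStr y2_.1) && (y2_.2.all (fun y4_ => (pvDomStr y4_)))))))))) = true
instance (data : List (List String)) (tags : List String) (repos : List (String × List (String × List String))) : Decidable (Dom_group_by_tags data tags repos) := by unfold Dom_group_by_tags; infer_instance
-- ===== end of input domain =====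

-- B replaces A's per-tag rescans of data by one pass over data that buckets each
-- item via a dict of tag buckets built once (objective: faster, asymptotic).

-- ===== PORT A =====
-- x[0] in repos and tag in repos[x[0]]["tags"]; the `none` branches (IndexError on
-- x[0], KeyError on ["tags"]) are excluded by Pre_ and return false here.
def pvPredA (repos : List (String × List (String × List String))) (tag : String) (x : List String) : Bool :=
  match PySem.List.pyGet? x 0 with
  | none => false
  | some k =>
    match List.lookup k repos with
    | none => false
    | some rd =>
      match List.lookup "tags" rd with
      | none => false
      | some rtags => rtags.contains tag

-- x[0] in repos and not any(tag in repos[x[0]]["tags"] for tag in tags)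
def pvPredAUntag (repos : List (String × List (String × List String))) (tags : List String) (x : List String) : Bool :=
  match PySem.List.pyGet? x 0 with
  | none => false
  | some k =>
    match List.lookup k repos with
    | none => false
    | some rd =>
      match List.lookup "tags" rd with
      | none => false
      | some rtags => !(tags.any (fun tag => rtags.contains tag))

def group_by_tags (data : List (List String)) (tags : List String) (repos : List (String × List (String × List String))) : List (List (List String)) :=
  (tags.foldl (fun ret tag => ret ++ [data.filter (pvPredA repos tag)]) []) ++
    [data.filter (pvPredAUntag repos tags)]

-- ===== PORT B =====
-- body of B's `for x in data` loop; the `none` branches mirror A's error cases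
-- (excluded by Pre_) and skip the item.
def pvStepB (repos : List (String × List (String × List String)))
    (acc : PySem.Dict String (List (List String)) × List (List String)) (x : List String) :
    PySem.Dict String (List (List String)) × List (List String) :=
  match PySem.List.pyGet? x 0 with
  | none => acc
  | some k =>
    match List.lookup k repos with
    | none => acc
    | some rd =>
      match List.lookup "tags" rd with
      | none => acc
      | some rtags =>
        -- for t in dict.fromkeys(rtags): b = buckets.get(t); if b is not None: b.append(x); hit = True
        let r := (PySem.List.dedup rtags).foldl
          (fun (p : PySem.Dict String (List (List String)) × Bool) t =>
            match p.1.get? t with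
            | none => p
            | some b => (p.1.insert t (b ++ [x]), true))
          (acc.1, false)
        (r.1, if r.2 then acc.2 else acc.2 ++ [x])

def group_by_tags_alt (data : List (List String)) (tags : List String) (repos : List (String × List (String × List String))) : List (List (List String)) :=
  let buckets0 := tags.foldl (fun d t => d.setdefault t ([] : List (List String))) PySem.Dict.empty
  let r := data.foldl (pvStepB repos) (buckets0, [])
  (tags.map (fun t => (r.1.get? t).getD [])) ++ [r.2]

-- ===== PRECONDITION & SPEC =====
-- Pre_ excludes exactly the inputs where Python A raises: a data item that is the
-- empty list (IndexError on x[0]) or whose repo entry lacks the "tags" key (KeyError).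
def Pre_group_by_tags (data : List (List String)) (tags : List String) (repos : List (String × List (String × List String))) : Prop :=
  (data.all (fun x => !x.isEmpty &&
    (match List.lookup (x.headD "") repos with
     | none => true
     | some rd => (List.lookup "tags" rd).isSome))) = true
instance (data : List (List String)) (tags : List String) (repos : List (String × List (String × List String))) : Decidable (Pre_group_by_tags data tags repos) := by unfold Pre_group_by_tags; infer_instance

def pvWitness_group_by_tags : List (List String) × List String × (List (String × List (String × List String))) :=
  ([["r1", "src"], ["r2", "src"]], ["ml", "web"],
   [("r1", [("tags", ["ml"])]), ("r2", [("tags", [])])])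

def Spec_group_by_tags (data : List (List String)) (tags : List String) (repos : List (String × List (String × List String))) (out : List (List (List String))) : Prop := out = group_by_tags_alt data tags repos
instance (data : List (List String)) (tags : List String) (repos : List (String × List (String × List String))) (out : List (List (List String))) : Decidable (Spec_group_by_tags data tags repos out) := by unfold Spec_group_by_tags; infer_instance

-- ===== CLAIM (what is proved, stated in full; the proofs are below) =====
def Claim_equal_group_by_tags : Prop := ∀ (data : List (List String)) (tags : List String) (repos : List (String × List (String × List String))), Dom_group_by_tags data tags repos → Pre_group_by_tags data tags repos → Spec_group_by_tags data tags repos (group_by_tags data tags repos)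

-- ===== LEMMAS AND PROOFS =====

-- A's loop `for tag in tags: ret.append(...)` is a map.
theorem pv_foldl_append_map {α β : Type} (l : List α) (f : α → β) (acc : List β) :
    l.foldl (fun r a => r ++ [f a]) acc = acc ++ l.map f := by
  induction l generalizing acc with
  | nil => simp
  | cons a l ih => simp [List.foldl_cons, ih]

-- the initial buckets dict: key t ↦ [] exactly for t ∈ tags
theorem pv_buckets0_get (ts : List String) (d : PySem.Dict String (List (List String)))
    (h : ∀ s, d.get? s = none ∨ d.get? s = some []) (s : String) :
    (ts.foldl (fun d t => d.setdefault t ([] : List (List String))) d).get? s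
      = if s ∈ ts ∨ (d.get? s).isSome then some [] else d.get? s := by
  induction ts generalizing d with
  | nil =>
    rcases h s with h' | h' <;> simp [h']
  | cons a ts ih =>
    simp only [List.foldl_cons]
    rw [ih]
    · by_cases hsa : s = a
      · subst hsa
        rcases h s with h' | h' <;>
          simp [PySem.Dict.get?_setdefault_self, h']
      · rw [PySem.Dict.get?_setdefault_of_ne _ _ hsa]
        simp [List.mem_cons, hsa]
    · intro t
      by_cases hta : t = a
      · subst hta
        rcases h t with h' | h' <;>
          simp [PySem.Dict.get?_setdefault_self, h']
      · rw [PySem.Dict.get?_setdefault_of_ne _ _ hta]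
        exact h t
-- the inner loop over the deduplicated repo tags, for one item x
theorem pv_inner (x : List String) (L : List String) (hnd : L.Nodup)
    (d : PySem.Dict String (List (List String))) (fl : Bool) :
    (∀ s, (L.foldl
        (fun (p : PySem.Dict String (List (List String)) × Bool) t =>
          match p.1.get? t with
          | none => p
          | some b => (p.1.insert t (b ++ [x]), true)) (d, fl)).1.get? s
        = match d.get? s with
          | none => none
          | some b => some (if s ∈ L ∧ (d.get? s).isSome then b ++ [x] else b))
    ∧ (L.foldl
        (fun (p : PySem.Dict String (List (List String)) × Bool) t =>
          match p.1.get? t with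
          | none => p
          | some b => (p.1.insert t (b ++ [x]), true)) (d, fl)).2
        = (fl || L.any (fun t => (d.get? t).isSome)) := by
  induction L generalizing d fl with
  | nil =>
    constructor
    · intro s
      cases hds : d.get? s <;> simp [hds]
    · simp
  | cons a L ih =>
    have hnd' : L.Nodup := hnd.of_cons
    have hna : a ∉ L := (List.nodup_cons.mp hnd).1
    simp only [List.foldl_cons]
    cases hda : d.get? a with
    | none =>
      obtain ⟨ih1, ih2⟩ := ih hnd' d fl
      constructor
      · intro s
        dsimp only
        rw [ih1 s]
        by_cases hsa : s = a
        · subst hsa; simp [hda]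
        · cases hds : d.get? s with
          | none => rfl
          | some b => simp [List.mem_cons, hsa]
      · dsimp only
        rw [ih2]
        simp [hda]
    | some b =>
      obtain ⟨ih1, ih2⟩ := ih hnd' (d.insert a (b ++ [x])) true
      constructor
      · intro s
        dsimp only
        rw [ih1 s]
        by_cases hsa : s = a
        · subst hsa
          rw [PySem.Dict.get?_insert_self, hda]
          simp [hna]
        · rw [PySem.Dict.get?_insert_of_ne _ _ hsa]
          cases hds : d.get? s with
          | none => rfl
          | some c => simp [List.mem_cons, hsa]
      · dsimp only
        rw [ih2]
        simp [hda]

-- the per-item append condition for the bucket of tag s (K = domain of the dict)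
def pvPredB (repos : List (String × List (String × List String))) (K : String → Bool) (s : String) (x : List String) : Bool :=
  match PySem.List.pyGet? x 0 with
  | none => false
  | some k =>
    match List.lookup k repos with
    | none => false
    | some rd =>
      match List.lookup "tags" rd with
      | none => false
      | some rtags => (PySem.List.dedup rtags).contains s && K s

def pvPredBUntag (repos : List (String × List (String × List String))) (K : String → Bool) (x : List String) : Bool :=
  match PySem.List.pyGet? x 0 with
  | none => false
  | some k =>
    match List.lookup k repos with
    | none => false
    | some rd =>
      match List.lookup "tags" rd with
      | none => false
      | some rtags => !((PySem.List.dedup rtags).any K)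

-- the outer loop over data, with the dict's key domain K held fixed
theorem pv_outer (repos : List (String × List (String × List String)))
    (data : List (List String)) (d : PySem.Dict String (List (List String)))
    (un : List (List String)) (K : String → Bool)
    (hK : ∀ s, (d.get? s).isSome = K s) :
    (∀ s, (data.foldl (pvStepB repos) (d, un)).1.get? s
        = match d.get? s with
          | none => none
          | some b => some (b ++ data.filter (pvPredB repos K s)))
    ∧ (data.foldl (pvStepB repos) (d, un)).2
        = un ++ data.filter (pvPredBUntag repos K) := by
  induction data generalizing d un with
  | nil =>
    constructor
    · intro s
      cases hds : d.get? s <;> simp [hds]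
    · simp
  | cons x data ih =>
    simp only [List.foldl_cons]
    -- evaluate the step on x
    cases hx0 : PySem.List.pyGet? x 0 with
    | none =>
      obtain ⟨ih1, ih2⟩ := ih d un hK
      refine ⟨fun s => ?_, ?_⟩
      · rw [show pvStepB repos (d, un) x = (d, un) by simp [pvStepB, hx0]]
        rw [ih1 s]
        cases hds : d.get? s <;> simp [pvPredB, hx0]
      · rw [show pvStepB repos (d, un) x = (d, un) by simp [pvStepB, hx0]]
        rw [ih2]
        simp [pvPredBUntag, hx0]
    | some k =>
      cases hk : List.lookup k repos with
      | none =>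
        obtain ⟨ih1, ih2⟩ := ih d un hK
        refine ⟨fun s => ?_, ?_⟩
        · rw [show pvStepB repos (d, un) x = (d, un) by simp [pvStepB, hx0, hk]]
          rw [ih1 s]
          cases hds : d.get? s <;> simp [pvPredB, hx0, hk]
        · rw [show pvStepB repos (d, un) x = (d, un) by simp [pvStepB, hx0, hk]]
          rw [ih2]
          simp [pvPredBUntag, hx0, hk]
      | some rd =>
        cases ht : List.lookup "tags" rd with
        | none =>
          obtain ⟨ih1, ih2⟩ := ih d un hK
          refine ⟨fun s => ?_, ?_⟩
          · rw [show pvStepB repos (d, un) x = (d, un) by simp [pvStepB, hx0, hk, ht]]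
            rw [ih1 s]
            cases hds : d.get? s <;> simp [pvPredB, hx0, hk, ht]
          · rw [show pvStepB repos (d, un) x = (d, un) by simp [pvStepB, hx0, hk, ht]]
            rw [ih2]
            simp [pvPredBUntag, hx0, hk, ht]
        | some rtags =>
          obtain ⟨in1, in2⟩ := pv_inner x (PySem.List.dedup rtags)
            (PySem.List.nodup_dedup rtags) d false
          set r := (PySem.List.dedup rtags).foldl
            (fun (p : PySem.Dict String (List (List String)) × Bool) t =>
              match p.1.get? t with
              | none => p
              | some b => (p.1.insert t (b ++ [x]), true)) (d, false) with hr
          have hstep : pvStepB repos (d, un) x = (r.1, if r.2 then un else un ++ [x]) := by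
            simp [pvStepB, hx0, hk, ht, hr]
          have hK' : ∀ s, (r.1.get? s).isSome = K s := by
            intro s
            rw [in1 s]
            cases hds : d.get? s
            · simpa [hds] using hK s
            · simpa [hds] using hK s
          obtain ⟨ih1, ih2⟩ := ih r.1 (if r.2 then un else un ++ [x]) hK'
          refine ⟨fun s => ?_, ?_⟩
          · rw [hstep, ih1 s, in1 s]
            cases hds : d.get? s with
            | none => rfl
            | some b =>
              have hKs : K s = true := by rw [← hK s, hds]; rfl
              simp only [Option.isSome_some, and_true,
                List.filter_cons, pvPredB, hx0, hk, ht, hKs, Bool.and_true]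
              by_cases hm : s ∈ rtags <;> simp [hm]
          · rw [hstep, ih2, in2]
            have hfun : (fun t => (d.get? t).isSome) = K := funext hK
            simp only [Bool.false_or, hfun, List.filter_cons, pvPredBUntag, hx0, hk, ht]
            cases hh : (PySem.List.dedup rtags).any K <;> simp

-- with K = membership in tags, B's per-bucket predicate is A's
theorem pv_predB_eq_predA (repos : List (String × List (String × List String)))
    (tags : List String) (t : String) (ht : t ∈ tags) (x : List String) :
    pvPredB repos (fun s => tags.contains s) t x = pvPredA repos t x := by
  unfold pvPredB pvPredA
  cases PySem.List.pyGet? x 0 with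
  | none => rfl
  | some k =>
    dsimp only
    cases List.lookup k repos with
    | none => rfl
    | some rd =>
      dsimp only
      cases List.lookup "tags" rd with
      | none => rfl
      | some rtags =>
        simp [ht]

theorem pv_predBU_eq_predAU (repos : List (String × List (String × List String)))
    (tags : List String) (x : List String) :
    pvPredBUntag repos (fun s => tags.contains s) x = pvPredAUntag repos tags x := by
  unfold pvPredBUntag pvPredAUntag
  cases PySem.List.pyGet? x 0 with
  | none => rfl
  | some k =>
    dsimp only
    cases List.lookup k repos with
    | none => rfl
    | some rd =>
      dsimp only
      cases List.lookup "tags" rd with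
      | none => rfl
      | some rtags =>
        dsimp only
        congr 1
        rw [Bool.eq_iff_iff]
        simp only [List.any_eq_true, List.contains_iff_mem, PySem.List.mem_dedup]
        constructor
        · rintro ⟨t, ht1, ht2⟩; exact ⟨t, ht2, ht1⟩
        · rintro ⟨t, ht1, ht2⟩; exact ⟨t, ht2, ht1⟩

-- ===== VERDICT (by name: the statement is the Claim_ definition above) =====
theorem group_by_tags_spec : Claim_equal_group_by_tags := by
  intro data tags repos _ _
  unfold Spec_group_by_tags group_by_tags group_by_tags_alt
  have hb0 : ∀ s, (tags.foldl (fun d t => d.setdefault t ([] : List (List String))) PySem.Dict.empty).get? s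
      = if s ∈ tags then some [] else none := by
    intro s
    rw [pv_buckets0_get tags PySem.Dict.empty (fun s => Or.inl (PySem.Dict.get?_empty s))]
    simp [PySem.Dict.get?_empty]
  have hK : ∀ s, ((tags.foldl (fun d t => d.setdefault t ([] : List (List String))) PySem.Dict.empty).get? s).isSome
      = tags.contains s := by
    intro s
    rw [hb0 s]
    by_cases h : s ∈ tags <;> simp [h]
  obtain ⟨h1, h2⟩ := pv_outer repos data _ [] (fun s => tags.contains s) hK
  rw [pv_foldl_append_map, List.nil_append]
  congr 1
  · apply List.map_congr_left
    intro t ht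
    have h1t := h1 t
    rw [hb0 t, if_pos ht] at h1t
    rw [h1t]
    simp only [List.nil_append, Option.getD_some]
    apply List.filter_congr
    intro y _
    exact (pv_predB_eq_predA repos tags t ht y).symm
  · congr 1
    rw [h2, List.nil_append]
    apply List.filter_congr
    intro y _
    exact (pv_predBU_eq_predAU repos tags y).symm
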